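-- pv_equiv track=rewrite | github.com/nursutopsakal-debug/K-s-ttan-mayanlar | src/scoring.py | _calculate_tension
-- ===== SOURCE A (Python) =====
-- def _calculate_tension(player_layout, guests_dict):
--     tension = 0
--
--     for guests in player_layout.values():
--         for guest_name in guests:
--             guest = guests_dict.get(guest_name)
--             if not guest:
--                 continue
--
--             disliked_people = guest.get("dislikes", [])
--             cannot_sit = guest.get("cannot_sit_with", [])
--
--             for other_name in guests:
--                 if other_name == guest_name:
--                     continue
--                 if other_name in disliked_people:
--                     tension -= 10
--                 if other_name in cannot_sit:
--                     tension -= 20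
--
--     return tension
-- ===== SOURCE B (Python) =====
-- def _calculate_tension(player_layout, guests_dict):
--     tension = 0
--     for guests in player_layout.values():
--         counts = {}
--         for name in guests:
--             counts[name] = counts.get(name, 0) + 1
--         for guest_name in guests:
--             guest = guests_dict.get(guest_name)
--             if not guest:
--                 continue
--             for other in set(guest.get("dislikes", [])):
--                 if other != guest_name:
--                     tension -= 10 * counts.get(other, 0)
--             for other in set(guest.get("cannot_sit_with", [])):
--                 if other != guest_name:
--                     tension -= 20 * counts.get(other, 0)
--     return tension
-- ===== Notes on version B (the rewrite author's own statement) =====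
-- stated objective: alternative
-- what changed: Replaces the inner pairwise scan over seated guests by a per-table occurrence counter built once, then sums penalties relation-driven: for each distinct disliked/cannot-sit name other than the guest itself it subtracts the weight times that name's seated count.
import Mathlib
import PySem

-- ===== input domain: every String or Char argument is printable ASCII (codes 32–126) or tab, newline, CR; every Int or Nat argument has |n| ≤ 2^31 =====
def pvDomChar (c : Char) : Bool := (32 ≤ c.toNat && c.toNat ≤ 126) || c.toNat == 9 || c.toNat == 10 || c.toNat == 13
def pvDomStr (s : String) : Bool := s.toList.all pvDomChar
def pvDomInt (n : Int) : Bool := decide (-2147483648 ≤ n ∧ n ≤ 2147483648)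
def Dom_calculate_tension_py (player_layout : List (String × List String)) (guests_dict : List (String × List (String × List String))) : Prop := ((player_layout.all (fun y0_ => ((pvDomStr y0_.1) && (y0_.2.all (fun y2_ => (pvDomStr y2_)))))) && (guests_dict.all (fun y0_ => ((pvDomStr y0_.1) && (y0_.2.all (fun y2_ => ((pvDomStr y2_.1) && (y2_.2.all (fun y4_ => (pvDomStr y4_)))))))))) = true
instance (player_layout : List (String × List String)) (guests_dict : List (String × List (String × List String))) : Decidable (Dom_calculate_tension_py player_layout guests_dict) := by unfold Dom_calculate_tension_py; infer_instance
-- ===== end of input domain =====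

-- B replaces A's inner pairwise scan by a per-table occurrence counter and relation-driven
-- count lookups (objective: alternative; not measurably faster on the timed inputs).

-- ===== PORT A =====
def calculate_tension_py (player_layout : List (String × List String)) (guests_dict : List (String × List (String × List String))) : Int :=
  let gd := PySem.Dict.ofList guests_dict
  ((PySem.Dict.ofList player_layout).values).foldl (fun tension guests =>
    guests.foldl (fun tension guest_name =>
      match gd.get? guest_name with
      | none => tension
      | some guest =>
        if guest = [] then tension  -- `if not guest: continue` (empty dict is falsy)
        else
          let g := PySem.Dict.ofList guest
          let disliked_people := g.getD "dislikes" []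
          let cannot_sit := g.getD "cannot_sit_with" []
          guests.foldl (fun tension other_name =>
            if other_name = guest_name then tension
            else
              let tension := if other_name ∈ disliked_people then tension - 10 else tension
              if other_name ∈ cannot_sit then tension - 20 else tension) tension) tension) 0

-- ===== PORT B =====
def calculate_tension_py_alt (player_layout : List (String × List String)) (guests_dict : List (String × List (String × List String))) : Int :=
  let gd := PySem.Dict.ofList guests_dict
  ((PySem.Dict.ofList player_layout).values).foldl (fun tension guests =>
    let counts : PySem.Dict String Int :=
      guests.foldl (fun d name => d.insert name (d.getD name 0 + 1)) PySem.Dict.empty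
    guests.foldl (fun tension guest_name =>
      match gd.get? guest_name with
      | none => tension
      | some guest =>
        if guest = [] then tension
        else
          let g := PySem.Dict.ofList guest
          let t1 := (PySem.Set.ofList (g.getD "dislikes" [])).foldl
              (fun t other => if other = guest_name then t else t - 10 * counts.getD other 0) tension
          (PySem.Set.ofList (g.getD "cannot_sit_with" [])).foldl
              (fun t other => if other = guest_name then t else t - 20 * counts.getD other 0) t1) tension) 0

-- ===== PRECONDITION & SPEC =====
def Spec_calculate_tension_py (player_layout : List (String × List String)) (guests_dict : List (String × List (String × List String))) (out : Int) : Prop := out = calculate_tension_py_alt player_layout guests_dict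
instance (player_layout : List (String × List String)) (guests_dict : List (String × List (String × List String))) (out : Int) : Decidable (Spec_calculate_tension_py player_layout guests_dict out) := by unfold Spec_calculate_tension_py; infer_instance

-- ===== CLAIM (what is proved, stated in full; the proofs are below) =====
def Claim_equal_calculate_tension_py : Prop := ∀ (player_layout : List (String × List String)) (guests_dict : List (String × List (String × List String))), Dom_calculate_tension_py player_layout guests_dict → Spec_calculate_tension_py player_layout guests_dict (calculate_tension_py player_layout guests_dict)

-- ===== LEMMAS AND PROOFS =====

-- A's inner pairwise scan, in closed form: 10 per seated non-self occurrence in D, 20 per one in C.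
lemma foldA_closed (gn : String) (D C : List String) :
    ∀ (guests : List String) (t : Int),
      guests.foldl (fun tension other =>
        if other = gn then tension
        else
          let tension := if other ∈ D then tension - 10 else tension
          if other ∈ C then tension - 20 else tension) t
      = t - 10 * (guests.countP (fun o => !(o == gn) && decide (o ∈ D)) : Int)
          - 20 * (guests.countP (fun o => !(o == gn) && decide (o ∈ C)) : Int) := by
  intro guests
  induction guests with
  | nil => intro t; simp
  | cons o gs ih =>
      intro t
      by_cases ho : o = gn
      · simp [List.foldl_cons, ho, ih]
      · by_cases hD : o ∈ D <;> by_cases hC : o ∈ C <;>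
          simp [List.foldl_cons, ho, hD, hC, ih] <;> ring

-- B's relation-driven fold, in closed form.
lemma foldB_closed (gn : String) (k : Int) (cnt : String → Int) :
    ∀ (S : List String) (t : Int),
      S.foldl (fun t other => if other = gn then t else t - k * cnt other) t
      = t - k * (((S.filter (fun o => !(o == gn))).map cnt).sum) := by
  intro S
  induction S with
  | nil => intro t; simp
  | cons o S' ih =>
      intro t
      by_cases ho : o = gn
      · simp [List.foldl_cons, ho, ih]
      · simp [List.foldl_cons, ho, ih]; ring

-- Counting swap: summing seated counts over a duplicate-free relation list equals
-- counting seated occurrences whose name is in the list.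
lemma sum_count_eq_countP (T : List String) (hT : T.Nodup) :
    ∀ (guests : List String),
      ((T.map (fun d => (guests.count d : Int))).sum)
      = (guests.countP (fun o => decide (o ∈ T)) : Int) := by
  intro guests
  induction guests with
  | nil => simp
  | cons x gs ih =>
      have hstep : (T.map (fun d => (List.count d (x :: gs) : Int)))
          = T.map (fun d => (List.count d gs : Int) + (if d == x then (1:Int) else 0)) := by
        apply List.map_congr_left
        intro d _
        rw [List.count_cons]
        push_cast
        by_cases h : x = d
        · subst h; simp
        · simp [h, Ne.symm h]
      have h2 : (T.map (fun d => if d == x then (1:Int) else 0)).sum = (T.count x : Int) := by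
        rw [PySem.List.sum_map_ite_one_zero (fun d => d == x) T]
        simp [List.count]
      rw [hstep, PySem.List.sum_map_add_int, ih, h2, List.countP_cons]
      by_cases hx : x ∈ T
      · rw [List.count_eq_one_of_mem hT hx]; simp [hx]
      · rw [List.count_eq_zero_of_not_mem hx]; simp [hx]

-- The per-relation-list sum B computes equals the occurrence count A computes.
lemma relation_sum (gn : String) (L guests : List String) :
    (((PySem.Set.ofList L).filter (fun o => !(o == gn))).map (fun d => (guests.count d : Int))).sum
    = (guests.countP (fun o => !(o == gn) && decide (o ∈ L)) : Int) := by
  have hnd : ((PySem.Set.ofList L).filter (fun o => !(o == gn))).Nodup :=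
    (PySem.Set.nodup_ofList L).filter _
  rw [sum_count_eq_countP _ hnd guests]
  congr 1
  apply List.countP_congr
  intro o _
  have : o ∈ (PySem.Set.ofList L).filter (fun o => !(o == gn)) ↔ (o ∈ L ∧ ¬ o = gn) := by
    simp [List.mem_filter, PySem.Set.mem_ofList, and_comm]
  by_cases ho : o = gn <;> by_cases hL : o ∈ L <;> simp [ho, hL, this]

-- The per-guest step functions of the two ports agree.
lemma per_guest_eq (gd : PySem.Dict String (List (String × List String)))
    (guests : List String) (t : Int) (gn : String) :
    (match gd.get? gn with
      | none => t
      | some guest =>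
        if guest = [] then t
        else
          let g := PySem.Dict.ofList guest
          let disliked_people := g.getD "dislikes" []
          let cannot_sit := g.getD "cannot_sit_with" []
          guests.foldl (fun tension other_name =>
            if other_name = gn then tension
            else
              let tension := if other_name ∈ disliked_people then tension - 10 else tension
              if other_name ∈ cannot_sit then tension - 20 else tension) t)
    = (match gd.get? gn with
      | none => t
      | some guest =>
        if guest = [] then t
        else
          let g := PySem.Dict.ofList guest
          let counts : PySem.Dict String Int :=
            guests.foldl (fun d name => d.insert name (d.getD name 0 + 1)) PySem.Dict.empty
          let t1 := (PySem.Set.ofList (g.getD "dislikes" [])).foldl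
              (fun u other => if other = gn then u else u - 10 * counts.getD other 0) t
          (PySem.Set.ofList (g.getD "cannot_sit_with" [])).foldl
              (fun u other => if other = gn then u else u - 20 * counts.getD other 0) t1) := by
  cases hget : gd.get? gn with
  | none => rfl
  | some guest =>
      simp only []
      by_cases hg : guest = []
      · simp [hg]
      · simp only [hg, if_false]
        have hcnt : ∀ o : String,
            (guests.foldl (fun d name => d.insert name (d.getD name 0 + 1))
              (PySem.Dict.empty : PySem.Dict String Int)).getD o 0 = (guests.count o : Int) := by
          intro o
          rw [PySem.Dict.getD_foldl_insert_add_one]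
          simp
        rw [foldA_closed]
        have hB : ∀ (k : Int) (L : List String) (u : Int),
            (PySem.Set.ofList L).foldl
              (fun u other => if other = gn then u else
                u - k * (guests.foldl (fun d name => d.insert name (d.getD name 0 + 1))
                  (PySem.Dict.empty : PySem.Dict String Int)).getD other 0) u
            = u - k * (guests.countP (fun o => !(o == gn) && decide (o ∈ L)) : Int) := by
          intro k L u
          have : (PySem.Set.ofList L).foldl
              (fun u other => if other = gn then u else
                u - k * (guests.foldl (fun d name => d.insert name (d.getD name 0 + 1))
                  (PySem.Dict.empty : PySem.Dict String Int)).getD other 0) u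
            = (PySem.Set.ofList L).foldl
              (fun u other => if other = gn then u else u - k * (guests.count other : Int)) u := by
            apply PySem.List.foldl_congr_mem
            intro a b _
            rw [hcnt]
          rw [this, foldB_closed gn k (fun d => (guests.count d : Int)), relation_sum]
        rw [hB, hB]

-- ===== VERDICT (by name: the statement is the Claim_ definition above) =====
theorem calculate_tension_py_spec : Claim_equal_calculate_tension_py := by
  intro player_layout guests_dict _
  unfold Spec_calculate_tension_py calculate_tension_py calculate_tension_py_alt
  simp only []
  apply PySem.List.foldl_congr_mem
  intro t guests _
  apply PySem.List.foldl_congr_mem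
  intro u gn _
  exact per_guest_eq (PySem.Dict.ofList guests_dict) guests u gn
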